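-- pv_equiv track=rewrite | github.com/StarChen-Cycler/deep-neural-network-learning | experiments/architecture_comparison.py | count_flops_cnn
-- ===== SOURCE A (Python) =====
-- from typing import Dict, List, Tuple, Any, Optional
--
-- def count_flops_cnn(input_shape: Tuple[int, ...], n_conv_layers: int = 5) -> int:
--     """
--     Estimate FLOPs for CNN forward pass.
--
--     Complexity: O(n * k^2 * c_in * c_out) per conv layer
--     Where n = H * W (spatial dims), k = kernel size, c = channels
--     """
--     batch, c, h, w = input_shape
--     # Assume typical CNN: channels double each layer, spatial dims halve
--     total_flops = 0
--     channels = c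
--     spatial = h * w
--
--     for i in range(n_conv_layers):
--         out_channels = channels * 2 if i < n_conv_layers - 1 else channels
--         kernel_ops = 3 * 3 * channels * out_channels  # 3x3 conv
--         total_flops += batch * spatial * kernel_ops
--         if i < n_conv_layers - 1:
--             channels = out_channels
--             spatial = spatial // 4  # 2x2 pooling
--
--     return total_flops
-- ===== SOURCE B (Python) =====
-- def count_flops_cnn(input_shape, n_conv_layers=5):
--     """Closed-form per-layer FLOPs: layer i has c*2**i channels and (h*w)//4**i
--     spatial positions, doubled output channels except on the last layer."""
--     batch, c, h, w = input_shape
--     hw = h * w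
--     return sum(
--         batch * (hw // 4 ** i) * 9 * (c * 2 ** i) ** 2
--         * (2 if i < n_conv_layers - 1 else 1)
--         for i in range(n_conv_layers)
--     )
-- ===== Notes on version B (the rewrite author's own statement) =====
-- stated objective: alternative
-- what changed: Replaces A's loop that threads running channels/spatial accumulators with a sum of closed-form per-layer terms channels_i = c*2**i and spatial_i = (h*w)//4**i.
import Mathlib
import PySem

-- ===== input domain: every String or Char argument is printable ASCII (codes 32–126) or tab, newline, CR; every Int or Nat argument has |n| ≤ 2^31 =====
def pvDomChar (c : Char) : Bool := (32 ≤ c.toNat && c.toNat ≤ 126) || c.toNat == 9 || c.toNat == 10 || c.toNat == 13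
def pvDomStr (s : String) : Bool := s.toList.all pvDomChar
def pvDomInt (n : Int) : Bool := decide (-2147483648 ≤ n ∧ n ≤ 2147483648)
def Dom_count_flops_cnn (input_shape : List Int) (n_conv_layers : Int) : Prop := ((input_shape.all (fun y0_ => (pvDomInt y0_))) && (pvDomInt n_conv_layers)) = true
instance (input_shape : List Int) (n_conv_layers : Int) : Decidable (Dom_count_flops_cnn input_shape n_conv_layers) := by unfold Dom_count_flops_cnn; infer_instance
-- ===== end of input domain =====

-- B replaces A's running channels/spatial state with a closed-form per-layer term summed over the layers (objective: alternative decomposition, same cost).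

-- ===== PORT A =====
-- loop body of A: state (total_flops, channels, spatial), loop variable i
def pvStepA (batch n_conv_layers : Int) (s : Int × Int × Int) (i : Int) : Int × Int × Int :=
  let (total_flops, channels, spatial) := s
  let out_channels := if i < n_conv_layers - 1 then channels * 2 else channels
  let kernel_ops := 3 * 3 * channels * out_channels
  let total_flops := total_flops + batch * spatial * kernel_ops
  if i < n_conv_layers - 1 then (total_flops, out_channels, PySem.Int.floordiv spatial 4)
  else (total_flops, channels, spatial)

def count_flops_cnn (input_shape : List Int) (n_conv_layers : Int) : Int :=
  match input_shape with
  | [batch, c, h, w] =>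
    ((PySem.List.pyRange 0 n_conv_layers 1).foldl (pvStepA batch n_conv_layers) (0, c, h * w)).1
  | _ => 0   -- unpacking raises ValueError: excluded by Pre_

-- ===== PORT B =====
-- one layer's closed-form contribution
def pvTermB (batch c hw n_conv_layers : Int) (i : Int) : Int :=
  batch * PySem.Int.floordiv hw (4 ^ i.toNat) * 9 * (c * 2 ^ i.toNat) ^ 2
    * (if i < n_conv_layers - 1 then 2 else 1)

def count_flops_cnn_alt (input_shape : List Int) (n_conv_layers : Int) : Int :=
  -- 4-tuple unpack, written as nested head/tail cases; anything else raises ValueError (excluded by Pre_)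
  match input_shape with
  | batch :: rest1 =>
    match rest1 with
    | c :: rest2 =>
      match rest2 with
      | h :: rest3 =>
        match rest3 with
        | w :: rest4 =>
          match rest4 with
          | [] =>
            ((PySem.List.pyRange 0 n_conv_layers 1).map (pvTermB batch c (h * w) n_conv_layers)).sum
          | _ :: _ => 0
        | [] => 0
      | [] => 0
    | [] => 0
  | [] => 0

-- ===== PRECONDITION & SPEC =====
-- A's 4-tuple unpack raises ValueError unless the shape has exactly 4 entries.
def Pre_count_flops_cnn (input_shape : List Int) (n_conv_layers : Int) : Prop :=
  input_shape.length = 4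
instance (input_shape : List Int) (n_conv_layers : Int) : Decidable (Pre_count_flops_cnn input_shape n_conv_layers) := by unfold Pre_count_flops_cnn; infer_instance

def pvWitness_count_flops_cnn : List Int × Int := ([2, 3, 32, 32], 5)

def Spec_count_flops_cnn (input_shape : List Int) (n_conv_layers : Int) (out : Int) : Prop := out = count_flops_cnn_alt input_shape n_conv_layers
instance (input_shape : List Int) (n_conv_layers : Int) (out : Int) : Decidable (Spec_count_flops_cnn input_shape n_conv_layers out) := by unfold Spec_count_flops_cnn; infer_instance

-- ===== CLAIM (what is proved, stated in full; the proofs are below) =====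
def Claim_equal_count_flops_cnn : Prop := ∀ (input_shape : List Int) (n_conv_layers : Int), Dom_count_flops_cnn input_shape n_conv_layers → Pre_count_flops_cnn input_shape n_conv_layers → Spec_count_flops_cnn input_shape n_conv_layers (count_flops_cnn input_shape n_conv_layers)

-- ===== LEMMAS AND PROOFS =====

-- iterated floor-division by 4 is floor-division by the power
lemma floordiv_pow_succ (hw : Int) (j : Nat) :
    PySem.Int.floordiv (PySem.Int.floordiv hw (4 ^ j)) 4 = PySem.Int.floordiv hw (4 ^ (j + 1)) := by
  rw [PySem.Int.floordiv_eq_ediv_of_pos (a := hw) (by positivity),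
      PySem.Int.floordiv_eq_ediv_of_pos (by omega),
      PySem.Int.floordiv_eq_ediv_of_pos (by positivity), pow_succ]
  exact Int.ediv_ediv_of_nonneg (by positivity)

-- loop invariant: from layer j on, A's fold adds exactly B's remaining closed-form terms
lemma key (batch c hw n : Int) : ∀ (k : Nat) (j t : Int), 0 ≤ j → j + k = n →
    ((PySem.List.pyRange j n 1).foldl (pvStepA batch n)
        (t, c * 2 ^ j.toNat, PySem.Int.floordiv hw (4 ^ j.toNat))).1
      = t + ((PySem.List.pyRange j n 1).map (pvTermB batch c hw n)).sum := by
  intro k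
  induction k with
  | zero =>
    intro j t hj hjk
    have : PySem.List.pyRange j n 1 = [] := by
      simp [PySem.List.pyRange_one]; omega
    simp [this]
  | succ k ih =>
    intro j t hj hjk
    have hjn : j < n := by omega
    rw [PySem.List.pyRange_one_cons hjn]
    simp only [List.foldl_cons, List.map_cons, List.sum_cons]
    by_cases hlast : j < n - 1
    · have hstep : pvStepA batch n (t, c * 2 ^ j.toNat, PySem.Int.floordiv hw (4 ^ j.toNat)) j
          = (t + pvTermB batch c hw n j, c * 2 ^ (j + 1).toNat,
             PySem.Int.floordiv hw (4 ^ (j + 1).toNat)) := by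
      -- unfold and use pow_succ / floordiv_pow_succ
        have h1 : (j + 1).toNat = j.toNat + 1 := by omega
        simp only [pvStepA, pvTermB, if_pos hlast, h1]
        refine Prod.ext ?_ (Prod.ext ?_ ?_) <;> simp only
        · ring
        · rw [pow_succ]; ring
        · exact floordiv_pow_succ hw j.toNat
      rw [hstep, ih (j + 1) _ (by omega) (by omega)]
      ring
    · -- last layer: no doubling, and the remaining range is empty
      have hj1 : j = n - 1 := by omega
      have hempty : PySem.List.pyRange (j + 1) n 1 = [] := by
        simp [PySem.List.pyRange_one]; omega
      simp only [pvStepA, pvTermB, if_neg hlast, hempty, List.foldl_nil, List.map_nil,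
        List.sum_nil]
      ring

-- ===== VERDICT (by name: the statement is the Claim_ definition above) =====
theorem count_flops_cnn_spec : Claim_equal_count_flops_cnn := by
  intro input_shape n hdom hpre
  unfold Spec_count_flops_cnn
  match input_shape, hpre with
  | [batch, c, h, w], _ =>
    unfold count_flops_cnn count_flops_cnn_alt
    by_cases hn : 0 < n
    · have h0 : c * 2 ^ (0 : Int).toNat = c := by norm_num
      have h1 : PySem.Int.floordiv (h * w) (4 ^ (0 : Int).toNat) = h * w := by
        norm_num [PySem.Int.floordiv_eq_ediv_of_pos (b := 1) (by omega)]
      have := key batch c (h * w) n n.toNat 0 0 le_rfl (by omega)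
      rw [h0, h1] at this
      simp [this]
    · have : PySem.List.pyRange 0 n 1 = [] := by
        simp [PySem.List.pyRange_one]; omega
      simp [this]
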